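-- pv_equiv track=rewrite | github.com/Sara-Clarin/CS555-OS-project | aesencrypt.py | mix_columns_transform
-- ===== SOURCE A (Python) =====
-- mix_col_matrix = [[0x02, 0x03, 0x01, 0x01],
--                    [0x01, 0x02, 0x03, 0x01],
--                    [0x01, 0x01, 0x02, 0x03],
--                    [0x03, 0x01, 0x01, 0x02]]
--
-- def mix_columns_transform(I_row, S_Col):
--     """
--     Function :   mix_columns_transform
--     Parameters : Current index row, state column
--     Output :     1 Byte
--     Description: Performs Mix Columns using polynomials over GF(2^8)
--     """
--     temp = 0x00
--
--     """Iterates over current Mix Col row and state array column to perform matrix multiplication"""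
--     for i in range(len(mix_col_matrix[I_row])):  # maybe can hardcode this to 4
--
--         element = mix_col_matrix[I_row][i]
--
--
--         """
--         Determine if you are multiplying either by 0x02, 0x03, or 0x01
--         If MS bit is set before multiplying temp by 2, XOR temp using polynomial x^4 + x^3 + x^2 + 1 (0x1B)
--         """
--         if element == 0x02:    # could store S_Col[i] as a variable so no lookups
--             temp ^= (S_Col[i] << 1)
--             if S_Col[i] >= 0x80:    # try "if x && y != z" instead of comparator
--                 temp ^= 0x1B
--
--         elif element == 0x03:
--             temp ^= S_Col[i] ^ (S_Col[i] << 1)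
--
--             if S_Col[i] >= 0x80:  # if hi_bit_set
--                 temp ^= 0x1B
--
--         else:
--             temp ^= S_Col[i]
--
--     return temp & 0xFF           # How is this different than return temp?
-- ===== SOURCE B (Python) =====
-- mix_col_matrix = [[0x02, 0x03, 0x01, 0x01],
--                    [0x01, 0x02, 0x03, 0x01],
--                    [0x01, 0x01, 0x02, 0x03],
--                    [0x03, 0x01, 0x01, 0x02]]
--
-- def gmul(a, x):
--     """Multiply a (a small non-negative coefficient) by x in GF(2^8),
--     by the standard shift-and-reduce bit loop over a's 8 bits."""
--     p = 0
--     for _ in range(8):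
--         if a & 1:
--             p ^= x
--         hi = x >= 0x80
--         x <<= 1
--         if hi:
--             x ^= 0x1B
--         a >>= 1
--     return p
--
-- def mix_columns_transform(I_row, S_Col):
--     temp = 0
--     for i in range(4):
--         temp ^= gmul(mix_col_matrix[I_row][i], S_Col[i])
--     return temp & 0xFF
-- ===== Notes on version B (the rewrite author's own statement) =====
-- stated objective: alternative
-- what changed: Replaces A's per-coefficient hard-coded branches (special cases for 0x02 and 0x03) with a single general GF(2^8) shift-and-reduce multiplication helper gmul(a, x) applied uniformly to every matrix coefficient.
import Mathlib
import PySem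

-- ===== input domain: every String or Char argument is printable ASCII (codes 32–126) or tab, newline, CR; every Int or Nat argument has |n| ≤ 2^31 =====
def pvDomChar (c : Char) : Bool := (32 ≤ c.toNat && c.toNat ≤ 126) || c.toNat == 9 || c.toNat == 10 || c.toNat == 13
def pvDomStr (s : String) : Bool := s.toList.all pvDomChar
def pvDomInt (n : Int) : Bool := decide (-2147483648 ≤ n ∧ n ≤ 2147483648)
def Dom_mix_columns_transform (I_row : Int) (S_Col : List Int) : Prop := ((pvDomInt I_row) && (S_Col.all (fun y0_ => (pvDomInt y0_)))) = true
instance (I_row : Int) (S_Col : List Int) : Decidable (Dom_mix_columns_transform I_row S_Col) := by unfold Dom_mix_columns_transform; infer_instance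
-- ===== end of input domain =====

-- B replaces A's hard-coded 0x02/0x03/else branches by a general GF(2^8) shift-and-reduce
-- multiply helper gmul, XORed into the accumulator for every matrix coefficient (objective: alternative).


-- module-level constant shared by both Pythons
def pvMixColMatrix : List (List Int) :=
  [[0x02, 0x03, 0x01, 0x01],
   [0x01, 0x02, 0x03, 0x01],
   [0x01, 0x01, 0x02, 0x03],
   [0x03, 0x01, 0x01, 0x02]]

-- ===== PORT A =====
-- literal port of A; the raw Python indexings `mix_col_matrix[I_row]` / `S_Col[i]` raise
-- IndexError outside Pre_, so pyGetD's defaults are never reached on admitted inputs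
def mix_columns_transform (I_row : Int) (S_Col : List Int) : Int :=
  let row := PySem.List.pyGetD pvMixColMatrix I_row []
  let temp := (PySem.List.pyRange 0 (row.length : Int) 1).foldl (fun temp i =>
    let element := PySem.List.pyGetD row i 0
    if element = 0x02 then
      let temp := PySem.Int.bxor temp ((PySem.List.pyGetD S_Col i 0) <<< 1)
      if PySem.List.pyGetD S_Col i 0 ≥ 0x80 then PySem.Int.bxor temp 0x1B else temp
    else if element = 0x03 then
      let s := PySem.List.pyGetD S_Col i 0
      let temp := PySem.Int.bxor temp (PySem.Int.bxor s (s <<< 1))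
      if s ≥ 0x80 then PySem.Int.bxor temp 0x1B else temp
    else
      PySem.Int.bxor temp (PySem.List.pyGetD S_Col i 0)) 0
  PySem.Int.band temp 0xFF

-- ===== PORT B =====
-- `for _ in range(8)` with state (p, a, x); Python's `if a & 1:` is band a 1 ≠ 0
def gmul (a x : Int) : Int :=
  ((List.range 8).foldl (fun (st : Int × Int × Int) _ =>
    let p := st.1
    let a := st.2.1
    let x := st.2.2
    let p := if PySem.Int.band a 1 ≠ 0 then PySem.Int.bxor p x else p
    let hi := x ≥ 0x80
    let x := x <<< 1
    let x := if hi then PySem.Int.bxor x 0x1B else x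
    (p, a >>> 1, x)) (0, a, x)).1

def mix_columns_transform_alt (I_row : Int) (S_Col : List Int) : Int :=
  let temp := (PySem.List.pyRange 0 4 1).foldl (fun temp i =>
    PySem.Int.bxor temp
      (gmul (PySem.List.pyGetD (PySem.List.pyGetD pvMixColMatrix I_row []) i 0)
            (PySem.List.pyGetD S_Col i 0))) 0
  PySem.Int.band temp 0xFF

-- ===== PRECONDITION & SPEC =====
-- Pre_ excludes exactly the inputs on which Python A raises IndexError: I_row outside the
-- 4-row matrix (after negative-index wraparound) or a state column with fewer than 4 entries.
def Pre_mix_columns_transform (I_row : Int) (S_Col : List Int) : Prop :=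
  (-4 ≤ I_row ∧ I_row < 4) ∧ 4 ≤ S_Col.length
instance (I_row : Int) (S_Col : List Int) : Decidable (Pre_mix_columns_transform I_row S_Col) := by unfold Pre_mix_columns_transform; infer_instance
def pvWitness_mix_columns_transform : Int × List Int := (0, [1, 2, 197, 246])

def Spec_mix_columns_transform (I_row : Int) (S_Col : List Int) (out : Int) : Prop := out = mix_columns_transform_alt I_row S_Col
instance (I_row : Int) (S_Col : List Int) (out : Int) : Decidable (Spec_mix_columns_transform I_row S_Col out) := by unfold Spec_mix_columns_transform; infer_instance

-- ===== CLAIM (what is proved, stated in full; the proofs are below) =====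
def Claim_equal_mix_columns_transform : Prop := ∀ (I_row : Int) (S_Col : List Int), Dom_mix_columns_transform I_row S_Col → Pre_mix_columns_transform I_row S_Col → Spec_mix_columns_transform I_row S_Col (mix_columns_transform I_row S_Col)

-- ===== LEMMAS AND PROOFS =====

lemma zero_bxor (a : Int) : PySem.Int.bxor 0 a = a := by
  rw [PySem.Int.bxor_comm]; exact PySem.Int.bxor_zero a

-- two's-complement encoding (sign bit, magnitude bits): bxor acts componentwise, giving associativity
def pvEnc (a : Int) : Bool × Nat := if 0 ≤ a then (false, a.toNat) else (true, (-a - 1).toNat)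
def pvDec (p : Bool × Nat) : Int := if p.1 then -(p.2 : Int) - 1 else (p.2 : Int)

lemma pvEnc_dec (p : Bool × Nat) : pvEnc (pvDec p) = p := by
  obtain ⟨s, n⟩ := p
  cases s with
  | false => simp [pvEnc, pvDec]
  | true => simp [pvEnc, pvDec]; omega

lemma bxor_eq_dec (a b : Int) :
    PySem.Int.bxor a b = pvDec (Bool.xor (pvEnc a).1 (pvEnc b).1, (pvEnc a).2 ^^^ (pvEnc b).2) := by
  unfold PySem.Int.bxor pvEnc pvDec
  split_ifs <;> simp_all

lemma bxor_assoc (a b c : Int) :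
    PySem.Int.bxor (PySem.Int.bxor a b) c = PySem.Int.bxor a (PySem.Int.bxor b c) := by
  rw [bxor_eq_dec a b, bxor_eq_dec b c, bxor_eq_dec _ c, bxor_eq_dec a _, pvEnc_dec, pvEnc_dec]
  simp [Nat.xor_assoc]

-- once the coefficient state reaches 0, the remaining gmul iterations leave p unchanged
lemma gmul_tail (l : List Nat) (p x : Int) :
    (l.foldl (fun (st : Int × Int × Int) _ =>
      let p := st.1
      let a := st.2.1
      let x := st.2.2
      let p := if PySem.Int.band a 1 ≠ 0 then PySem.Int.bxor p x else p
      let hi := x ≥ 0x80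
      let x := x <<< 1
      let x := if hi then PySem.Int.bxor x 0x1B else x
      (p, a >>> 1, x)) (p, 0, x)).1 = p := by
  induction l generalizing x with
  | nil => rfl
  | cons h t ih =>
      simp only [List.foldl_cons, show PySem.Int.band 0 1 = 0 from by decide,
        show (0:Int) >>> 1 = 0 from by decide, ne_eq, not_true_eq_false, if_false]
      exact ih _

lemma gmul_one (s : Int) : gmul 1 s = s := by
  unfold gmul
  rw [show List.range 8 = 0 :: [1,2,3,4,5,6,7] from by decide, List.foldl_cons]
  simp only [show PySem.Int.band 1 1 = 1 from by decide,
    show (1:Int) >>> 1 = 0 from by decide, ne_eq, one_ne_zero, not_false_eq_true, if_true]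
  rw [gmul_tail]
  exact zero_bxor s

lemma gmul_two (s : Int) :
    gmul 2 s = if 0x80 ≤ s then PySem.Int.bxor (s <<< 1) 0x1B else s <<< 1 := by
  unfold gmul
  rw [show List.range 8 = 0 :: 1 :: [2,3,4,5,6,7] from by decide, List.foldl_cons, List.foldl_cons]
  simp only [show PySem.Int.band 2 1 = 0 from by decide, show PySem.Int.band 1 1 = 1 from by decide,
    show (2:Int) >>> 1 = 1 from by decide, show (1:Int) >>> 1 = 0 from by decide,
    ne_eq, one_ne_zero, not_false_eq_true, if_true, not_true_eq_false, if_false, ge_iff_le]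
  rw [gmul_tail]
  split_ifs <;> rw [zero_bxor]

lemma gmul_three (s : Int) :
    gmul 3 s = if 0x80 ≤ s then PySem.Int.bxor s (PySem.Int.bxor (s <<< 1) 0x1B)
               else PySem.Int.bxor s (s <<< 1) := by
  unfold gmul
  rw [show List.range 8 = 0 :: 1 :: [2,3,4,5,6,7] from by decide, List.foldl_cons, List.foldl_cons]
  simp only [show PySem.Int.band 3 1 = 1 from by decide, show PySem.Int.band 1 1 = 1 from by decide,
    show (3:Int) >>> 1 = 1 from by decide, show (1:Int) >>> 1 = 0 from by decide,
    ne_eq, one_ne_zero, not_false_eq_true, if_true, ge_iff_le]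
  rw [gmul_tail]
  split_ifs <;> rw [zero_bxor]

-- A's three branch bodies each equal XORing gmul of the coefficient into the accumulator
lemma stepA_two (t s : Int) :
    (if 0x80 ≤ s then PySem.Int.bxor (PySem.Int.bxor t (s <<< 1)) 0x1B
     else PySem.Int.bxor t (s <<< 1)) = PySem.Int.bxor t (gmul 2 s) := by
  rw [gmul_two]; split_ifs with h
  · rw [bxor_assoc]
  · rfl

lemma stepA_three (t s : Int) :
    (if 0x80 ≤ s then PySem.Int.bxor (PySem.Int.bxor t (PySem.Int.bxor s (s <<< 1))) 0x1B
     else PySem.Int.bxor t (PySem.Int.bxor s (s <<< 1))) = PySem.Int.bxor t (gmul 3 s) := by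
  rw [gmul_three]; split_ifs with h
  · rw [bxor_assoc, bxor_assoc]
  · rfl

-- ===== VERDICT (by name: the statement is the Claim_ definition above) =====
theorem mix_columns_transform_spec : Claim_equal_mix_columns_transform := by
  intro I_row S_Col _ hpre
  obtain ⟨⟨h1, h2⟩, hlen⟩ := hpre
  obtain ⟨s0, s1, s2, s3, rest, rfl⟩ :
      ∃ a b c d r, S_Col = a :: b :: c :: d :: r := by
    match S_Col, hlen with
    | a :: b :: c :: d :: r, _ => exact ⟨a, b, c, d, r, rfl⟩
  unfold Spec_mix_columns_transform mix_columns_transform mix_columns_transform_alt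
  interval_cases I_row <;>
  · simp only [
      show (PySem.List.pyGetD pvMixColMatrix (-4) []) = [2,3,1,1] from by decide,
      show (PySem.List.pyGetD pvMixColMatrix (-3) []) = [1,2,3,1] from by decide,
      show (PySem.List.pyGetD pvMixColMatrix (-2) []) = [1,1,2,3] from by decide,
      show (PySem.List.pyGetD pvMixColMatrix (-1) []) = [3,1,1,2] from by decide,
      show (PySem.List.pyGetD pvMixColMatrix 0 []) = [2,3,1,1] from by decide,
      show (PySem.List.pyGetD pvMixColMatrix 1 []) = [1,2,3,1] from by decide,
      show (PySem.List.pyGetD pvMixColMatrix 2 []) = [1,1,2,3] from by decide,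
      show (PySem.List.pyGetD pvMixColMatrix 3 []) = [3,1,1,2] from by decide,
      show ∀ a b c d : Int, (([a, b, c, d].length : Nat) : Int) = 4 from by intro _ _ _ _; rfl]
    rw [show PySem.List.pyRange 0 4 1 = [0, 1, 2, 3] from by decide]
    simp only [List.foldl_cons, List.foldl_nil, PySem.List.pyGetD_ofNat',
      List.getD, List.getElem?_cons_zero, List.getElem?_cons_succ, Option.getD_some,
      ge_iff_le]
    norm_num [stepA_two, stepA_three, gmul_one]
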